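-- pv_equiv track=rewrite | github.com/adrianmoac/clone-code-detection | originalDataset/1567388.py | solve
-- ===== SOURCE A (Python) =====
-- def solve(line1, line2):
--     seq = []
--     if len(line1) == 0:
--         return 0
--     elif len(line1) == 1:
--         return 3
--     else:
--         prev_mark = line1[0]
--         for m in line1[1:]:
--             if prev_mark is None:
--                 prev_mark = m
--                 continue
--             if m == prev_mark:
--                 seq.append('h')
--                 prev_mark = None
--             else:
--                 seq.append('v')
--                 prev_mark = m
--         if prev_mark:
--             seq.append('v')
--
--     if len(seq) == 1:
--         return 6
--     if seq[0] == 'h':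
--         ans = 6
--         prev_p = 'h'
--     else:
--         ans = 3
--         prev_p = 'v'
--
--     for d in seq[1:]:
--         if prev_p == 'h' and d == 'h':
--             ans *= 3
--             prev_p = 'h'
--         elif prev_p == 'h' and d == 'v':
--             prev_p = 'v'
--         elif prev_p == 'v' and d == 'h':
--             ans *= 2
--             prev_p = 'h'
--         else:
--             ans *= 2
--             prev_p = 'v'
--     return ans % 1000000007
-- ===== SOURCE B (Python) =====
-- MOD = 1000000007
--
--
-- def solve(line1, line2):
--     if len(line1) == 0:
--         return 0
--     if len(line1) == 1:
--         return 3
--     # pass 1: pair the marks into a boolean token list (True = 'horizontal' pair)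
--     seq = []
--     pending = line1[0]
--     for m in line1[1:]:
--         if pending is None:
--             pending = m
--         elif m == pending:
--             seq.append(True)
--             pending = None
--         else:
--             seq.append(False)
--             pending = m
--     if pending:
--         seq.append(False)
--     if len(seq) == 1:
--         return 6
--     # closed form instead of the multiplier automaton:
--     # answer = base * 3^(# adjacent True,True pairs) * 2^(# tokens preceded by a False)
--     hh = sum(1 for a, b in zip(seq, seq[1:]) if a and b)
--     av = sum(1 for a in seq[:-1] if not a)
--     base = 6 if seq[0] else 3
--     return base * pow(3, hh, MOD) * pow(2, av, MOD) % MOD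
-- ===== Notes on version B (the rewrite author's own statement) =====
-- stated objective: faster
-- what changed: The scoring state machine (iterated x3/x2 bignum multiplication over the token list) is replaced by a closed form: count the adjacent (h,h) pairs and the tokens preceded by a v, then compute base * 3^hh * 2^av with modular exponentiation; the token pass stores booleans instead of characters.
import Mathlib
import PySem

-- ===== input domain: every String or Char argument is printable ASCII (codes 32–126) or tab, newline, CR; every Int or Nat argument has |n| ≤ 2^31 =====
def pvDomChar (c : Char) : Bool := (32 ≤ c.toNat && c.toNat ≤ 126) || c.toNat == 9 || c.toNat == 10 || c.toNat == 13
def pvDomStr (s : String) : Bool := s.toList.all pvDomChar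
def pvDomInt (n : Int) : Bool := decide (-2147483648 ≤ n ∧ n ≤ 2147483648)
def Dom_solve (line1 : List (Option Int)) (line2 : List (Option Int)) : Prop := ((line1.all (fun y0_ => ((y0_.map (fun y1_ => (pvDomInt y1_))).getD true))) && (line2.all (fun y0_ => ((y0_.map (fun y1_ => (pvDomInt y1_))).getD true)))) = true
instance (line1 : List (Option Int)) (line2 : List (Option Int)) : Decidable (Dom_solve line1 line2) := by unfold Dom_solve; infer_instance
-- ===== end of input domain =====

-- B replaces A's scoring state machine by a closed form (pair counts + modular
-- exponentiation) over a boolean token list; measurably faster (A's product is an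
-- unbounded bignum, B counts and uses pow with modulus).


-- Python truthiness of an Optional[int]: None and 0 are falsy
def pyTruthy : Option Int → Bool
  | none => false
  | some n => n != 0

-- ===== PORT A =====
-- one iteration of A's first loop: state (seq, prev_mark)
def stepSeq (st : List Char × Option Int) (m : Option Int) : List Char × Option Int :=
  match st.2 with
  | none => (st.1, m)
  | some _ => if m == st.2 then (st.1 ++ ['h'], none) else (st.1 ++ ['v'], m)

-- one iteration of A's scoring loop: state (ans, prev_p)
def stepScore (st : Int × Char) (d : Char) : Int × Char :=
  if st.2 == 'h' && d == 'h' then (st.1 * 3, 'h')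
  else if st.2 == 'h' && d == 'v' then (st.1, 'v')
  else if st.2 == 'v' && d == 'h' then (st.1 * 2, 'h')
  else (st.1 * 2, 'v')

def solve (line1 : List (Option Int)) (line2 : List (Option Int)) : Int :=
  match line1 with
  | [] => 0
  | [_] => 3
  | p0 :: rest =>
    let st := rest.foldl stepSeq ([], p0)
    let seq := if pyTruthy st.2 then st.1 ++ ['v'] else st.1
    if seq.length == 1 then 6
    else
      match seq with
      | [] => 0   -- Python A raises IndexError on seq[0] here; excluded by Pre_solve
      | d0 :: ds =>
        let init : Int × Char := if d0 == 'h' then (6, 'h') else (3, 'v')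
        let fin := ds.foldl stepScore init
        PySem.Int.mod fin.1 1000000007

-- ===== PORT B =====
-- B's own truthiness helper for Optional[int] (None and 0 are falsy)
def pyTruthyB (x : Option Int) : Bool := x.getD 0 != 0

-- Source B's first pass: pair the marks into booleans, state (seq, pending)
def tokStep (st : List Bool × Option Int) (m : Option Int) : List Bool × Option Int :=
  match st.2 with
  | none => (st.1, m)
  | some _ => if m == st.2 then (st.1 ++ [true], none) else (st.1 ++ [false], m)

def solve_alt (line1 : List (Option Int)) (line2 : List (Option Int)) : Int :=
  if line1.length == 0 then 0
  else if line1.length == 1 then 3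
  else
    let st := (line1.drop 1).foldl tokStep ([], line1.headI)
    let seq := if pyTruthyB st.2 then st.1 ++ [false] else st.1
    if seq.length == 1 then 6
    else if seq.isEmpty then 0   -- Python B raises IndexError on seq[0] here; excluded by Pre_solve
    else
      -- closed form: hh = adjacent (True,True) pairs, av = tokens preceded by False
      let hh : Nat := (seq.zip (seq.drop 1)).countP (fun p => p.1 && p.2)
      let av : Nat := seq.dropLast.countP (fun a => !a)
      let base : Int := if seq.headI then 6 else 3
      -- pow(3, hh, MOD) / pow(2, av, MOD) ported as (3^hh % M) / (2^av % M)
      PySem.Int.mod (base * ((3:Int) ^ hh % 1000000007) * ((2:Int) ^ av % 1000000007)) 1000000007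

-- ===== PRECONDITION & SPEC =====
-- Pre_ excludes exactly the inputs where both Pythons raise IndexError on seq[0]
-- (the token list comes out empty): length ≥ 2, all elements but the last None,
-- and the last None or 0 (Python falsy).
def Pre_solve (line1 : List (Option Int)) (line2 : List (Option Int)) : Prop :=
  ¬ (2 ≤ line1.length ∧ line1.dropLast.all (· = none) ∧
     (line1.getLastD none = none ∨ line1.getLastD none = some 0))
instance (line1 : List (Option Int)) (line2 : List (Option Int)) : Decidable (Pre_solve line1 line2) := by unfold Pre_solve; infer_instance

def pvWitness_solve : List (Option Int) × List (Option Int) := ([some 1, some 1, some 2], [])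

def Spec_solve (line1 : List (Option Int)) (line2 : List (Option Int)) (out : Int) : Prop := out = solve_alt line1 line2
instance (line1 : List (Option Int)) (line2 : List (Option Int)) (out : Int) : Decidable (Spec_solve line1 line2 out) := by unfold Spec_solve; infer_instance

-- ===== CLAIM =====
def Claim_equal_solve : Prop := ∀ (line1 : List (Option Int)) (line2 : List (Option Int)), Dom_solve line1 line2 → Pre_solve line1 line2 → Spec_solve line1 line2 (solve line1 line2)

-- ===== LEMMAS AND PROOFS =====

-- pair counters used to characterise A's scoring fold
def pairsHH : List Char → Nat
  | a :: b :: t => (if a == 'h' && b == 'h' then 1 else 0) + pairsHH (b :: t)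
  | _ => 0

def pairsNV : List Char → Nat
  | a :: b :: t => (if a == 'h' then 0 else 1) + pairsNV (b :: t)
  | _ => 0

theorem pyTruthy_false_iff (x : Option Int) : pyTruthy x = false ↔ (x = none ∨ x = some 0) := by
  cases x with
  | none => simp [pyTruthy]
  | some n => simp [pyTruthy]

theorem pyTruthyB_eq (x : Option Int) : pyTruthyB x = pyTruthy x := by
  cases x <;> simp [pyTruthy, pyTruthyB]

theorem solve_alt_cons2 (p0 m : Option Int) (rest l2 : List (Option Int)) :
    solve_alt (p0 :: m :: rest) l2 =
      (let st := (m :: rest).foldl tokStep ([], p0)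
       let seq := if pyTruthy st.2 then st.1 ++ [false] else st.1
       if seq.length == 1 then 6
       else if seq.isEmpty then 0
       else
         let hh : Nat := (seq.zip (seq.drop 1)).countP (fun p => p.1 && p.2)
         let av : Nat := seq.dropLast.countP (fun a => !a)
         let base : Int := if seq.headI then 6 else 3
         PySem.Int.mod (base * ((3:Int) ^ hh % 1000000007) * ((2:Int) ^ av % 1000000007))
           1000000007) := by
  simp [solve_alt, pyTruthyB_eq, List.headI]

-- B's boolean token fold is A's char token fold mapped through (· == 'h')
theorem tokfuse (l : List (Option Int)) (s0 : List Char) (prev : Option Int) :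
    l.foldl tokStep (s0.map (· == 'h'), prev) =
      ((l.foldl stepSeq (s0, prev)).1.map (· == 'h'), (l.foldl stepSeq (s0, prev)).2) := by
  induction l generalizing s0 prev with
  | nil => rfl
  | cons m l ih =>
    simp only [List.foldl_cons]
    cases prev with
    | none => simpa [tokStep, stepSeq] using ih s0 m
    | some v =>
      by_cases hm : m == some v
      · have h1 : tokStep (s0.map (· == 'h'), some v) m = ((s0 ++ ['h']).map (· == 'h'), none) := by
          simp [tokStep, hm]
        have h2 : stepSeq (s0, some v) m = (s0 ++ ['h'], none) := by simp [stepSeq, hm]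
        rw [h1, h2]; exact ih _ _
      · have h1 : tokStep (s0.map (· == 'h'), some v) m = ((s0 ++ ['v']).map (· == 'h'), m) := by
          simp [tokStep, hm]
        have h2 : stepSeq (s0, some v) m = (s0 ++ ['v'], m) := by simp [stepSeq, hm]
        rw [h1, h2]; exact ih _ _

-- A's seq only grows
theorem seq_prefix (l : List (Option Int)) (seq0 : List Char) (prev : Option Int) :
    ∃ t, (l.foldl stepSeq (seq0, prev)).1 = seq0 ++ t := by
  induction l generalizing seq0 prev with
  | nil => exact ⟨[], by simp⟩
  | cons m l ih =>
    simp only [List.foldl_cons]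
    cases prev with
    | none => simpa [stepSeq] using ih seq0 m
    | some v =>
      by_cases hm : m == some v
      · obtain ⟨t, ht⟩ := ih (seq0 ++ ['h']) none
        exact ⟨'h' :: t, by simp [stepSeq, hm, ht]⟩
      · obtain ⟨t, ht⟩ := ih (seq0 ++ ['v']) m
        exact ⟨'v' :: t, by simp [stepSeq, hm, ht]⟩

-- A's seq elements are 'h' or 'v'
theorem seq_elems (l : List (Option Int)) (seq0 : List Char) (prev : Option Int)
    (h0 : ∀ d ∈ seq0, d = 'h' ∨ d = 'v') :
    ∀ d ∈ (l.foldl stepSeq (seq0, prev)).1, d = 'h' ∨ d = 'v' := by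
  induction l generalizing seq0 prev with
  | nil => simpa using h0
  | cons m l ih =>
    simp only [List.foldl_cons]
    cases prev with
    | none =>
      have : stepSeq (seq0, none) m = (seq0, m) := by simp [stepSeq]
      rw [this]; exact ih seq0 m h0
    | some v =>
      by_cases hm : m == some v
      · have hs : stepSeq (seq0, some v) m = (seq0 ++ ['h'], none) := by simp [stepSeq, hm]
        rw [hs]
        refine ih _ _ ?_
        intro d hd
        rcases List.mem_append.mp hd with h | h
        · exact h0 d h
        · left; simpa using h
      · have hs : stepSeq (seq0, some v) m = (seq0 ++ ['v'], m) := by simp [stepSeq, hm]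
        rw [hs]
        refine ih _ _ ?_
        intro d hd
        rcases List.mem_append.mp hd with h | h
        · exact h0 d h
        · right; simpa using h

-- emptiness of the full token list, characterised on the input
theorem seq_empty_iff (l : List (Option Int)) (prev : Option Int) :
    ((if pyTruthy (l.foldl stepSeq ([], prev)).2
        then (l.foldl stepSeq ([], prev)).1 ++ ['v']
        else (l.foldl stepSeq ([], prev)).1) = [] ↔
      ((prev :: l).dropLast.all (· = none) = true ∧
        pyTruthy ((prev :: l).getLastD none) = false)) := by
  induction l generalizing prev with
  | nil =>
    by_cases h : pyTruthy prev <;> simp [h]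
  | cons m l ih =>
    simp only [List.foldl_cons]
    cases prev with
    | none =>
      have hs : stepSeq (([] : List Char), none) m = ([], m) := by simp [stepSeq]
      rw [hs, ih m]
      have hdl : (none :: m :: l).dropLast = none :: (m :: l).dropLast := rfl
      rw [hdl]
      simp
    | some v =>
      constructor
      · intro h
        exfalso
        by_cases hm : m == some v
        · have hs : stepSeq (([] : List Char), some v) m = (['h'], none) := by
            simp [stepSeq, hm]
          rw [hs] at h
          obtain ⟨t, ht⟩ := seq_prefix l ['h'] none
          rcases (em (pyTruthy (l.foldl stepSeq (['h'], none)).2 = true)) with htr | htr <;>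
            simp [htr, ht] at h
        · have hs : stepSeq (([] : List Char), some v) m = (['v'], m) := by
            simp [stepSeq, hm]
          rw [hs] at h
          obtain ⟨t, ht⟩ := seq_prefix l ['v'] m
          rcases (em (pyTruthy (l.foldl stepSeq (['v'], m)).2 = true)) with htr | htr <;>
            simp [htr, ht] at h
      · rintro ⟨h1, _⟩
        exfalso
        have hdl : (some v :: m :: l).dropLast = some v :: (m :: l).dropLast := rfl
        rw [hdl] at h1
        simp at h1

-- B's hh counter on the mapped list is pairsHH
theorem hh_map (s : List Char) :
    (((s.map (· == 'h')).zip ((s.map (· == 'h')).drop 1)).countP (fun p => p.1 && p.2))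
      = pairsHH s := by
  induction s with
  | nil => simp [pairsHH]
  | cons a t ih =>
    cases t with
    | nil => simp [pairsHH]
    | cons b t' =>
      have := ih
      simp only [List.map_cons, List.drop_succ_cons, List.drop_zero, List.zip_cons_cons,
        List.countP_cons] at this ⊢
      rw [this, pairsHH]
      by_cases ha : a = 'h' <;> by_cases hb : b = 'h' <;> simp [ha, hb] <;> omega

-- B's av counter on the mapped list is pairsNV
theorem nv_map (s : List Char) :
    ((s.map (· == 'h')).dropLast.countP (fun a => !a)) = pairsNV s := by
  induction s with
  | nil => simp [pairsNV]
  | cons a t ih =>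
    cases t with
    | nil => simp [pairsNV]
    | cons b t' =>
      have hd : ((a :: b :: t').map (· == 'h')).dropLast
          = (a == 'h') :: ((b :: t').map (· == 'h')).dropLast := by
        simp
      rw [hd, List.countP_cons, ih, pairsNV]
      by_cases ha : a = 'h' <;> simp [ha] <;> omega

-- A's scoring fold computed in closed form
theorem score_closed (ds : List Char) (a : Int) (p : Char)
    (hp0 : p = 'h' ∨ p = 'v') (hds : ∀ d ∈ ds, d = 'h' ∨ d = 'v') :
    (ds.foldl stepScore (a, p)).1 = a * 3 ^ pairsHH (p :: ds) * 2 ^ pairsNV (p :: ds) := by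
  induction ds generalizing a p with
  | nil => simp [pairsHH, pairsNV]
  | cons d ds ih =>
    have hd : d = 'h' ∨ d = 'v' := hds d (by simp)
    have hds' : ∀ x ∈ ds, x = 'h' ∨ x = 'v' := fun x hx => hds x (by simp [hx])
    simp only [List.foldl_cons]
    rcases hp0 with hp | hp <;> rcases hd with hd | hd <;> subst hp <;> subst hd
    · rw [show stepScore (a, 'h') 'h' = (a * 3, 'h') from by simp [stepScore]]
      rw [ih _ _ (Or.inl rfl) hds']
      simp [pairsHH, pairsNV, pow_add]
      ring
    · rw [show stepScore (a, 'h') 'v' = (a, 'v') from by simp [stepScore]]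
      rw [ih _ _ (Or.inr rfl) hds']
      simp [pairsHH, pairsNV]
    · rw [show stepScore (a, 'v') 'h' = (a * 2, 'h') from by simp [stepScore]]
      rw [ih _ _ (Or.inl rfl) hds']
      simp [pairsHH, pairsNV, pow_add]
      ring
    · rw [show stepScore (a, 'v') 'v' = (a * 2, 'v') from by simp [stepScore]]
      rw [ih _ _ (Or.inr rfl) hds']
      simp [pairsHH, pairsNV, pow_add]
      ring

-- modular congruence for the two final expressions
theorem mod_bridge (b x y : Int) :
    PySem.Int.mod (b * (x % 1000000007) * (y % 1000000007)) 1000000007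
      = PySem.Int.mod (b * x * y) 1000000007 := by
  rw [PySem.Int.mod_eq_emod_of_pos (by norm_num), PySem.Int.mod_eq_emod_of_pos (by norm_num)]
  conv_rhs => rw [Int.mul_emod, Int.mul_emod b x]
  conv_lhs => rw [Int.mul_emod, Int.mul_emod b (x % 1000000007)]
  simp [Int.emod_emod_of_dvd]

theorem solve_spec : Claim_equal_solve := by
  intro line1 line2 _ hpre
  unfold Spec_solve
  match line1 with
  | [] => rfl
  | [_] => rfl
  | p0 :: m :: rest =>
    unfold Pre_solve at hpre
    simp only [solve, solve_alt_cons2]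
    have hfuse := tokfuse (m :: rest) [] p0
    set sA := (m :: rest).foldl stepSeq ([], p0) with hsA
    set seqA := (if pyTruthy sA.2 then sA.1 ++ ['v'] else sA.1) with hseqA
    have hstB : (m :: rest).foldl tokStep ([], p0) = (sA.1.map (· == 'h'), sA.2) := by
      simpa using hfuse
    rw [hstB]
    have hmapseq : (if pyTruthy sA.2 then sA.1.map (· == 'h') ++ [false]
          else sA.1.map (· == 'h')) = seqA.map (· == 'h') := by
      rw [hseqA]
      by_cases h : pyTruthy sA.2 <;> simp [h]
    rw [hmapseq]
    have hlen : (seqA.map (· == 'h')).length = seqA.length := by simp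
    rw [hlen]
    by_cases h1 : seqA.length == 1
    · simp [h1]
    · rw [if_neg h1, if_neg h1]
      have hne : seqA ≠ [] := by
        intro h
        rw [hseqA] at h
        have hemp := (seq_empty_iff (m :: rest) p0).mp h
        apply hpre
        refine ⟨by simp, hemp.1, ?_⟩
        exact (pyTruthy_false_iff _).mp hemp.2
      have helems : ∀ d ∈ seqA, d = 'h' ∨ d = 'v' := by
        intro d hd
        rw [hseqA] at hd
        have hel := seq_elems (m :: rest) [] p0 (by simp)
        by_cases h : pyTruthy sA.2
        · rw [if_pos h, List.mem_append] at hd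
          rcases hd with hd | hd
          · exact hel d hd
          · right; simpa using hd
        · rw [if_neg h] at hd
          exact hel d hd
      obtain ⟨d0, ds, hcons⟩ : ∃ d0 ds, seqA = d0 :: ds := by
        cases hh : seqA with
        | nil => exact absurd hh hne
        | cons a b => exact ⟨a, b, rfl⟩
      have hd0 : d0 = 'h' ∨ d0 = 'v' := helems d0 (by rw [hcons]; simp)
      have hds : ∀ d ∈ ds, d = 'h' ∨ d = 'v' :=
        fun d hd => helems d (by rw [hcons]; exact List.mem_cons_of_mem _ hd)
      rw [hcons]
      simp only [List.map_cons]
      simp only [List.isEmpty_cons, Bool.false_eq_true, if_false]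
      have e1 : ((d0 == 'h') :: List.map (fun x => x == 'h') ds)
          = (d0 :: ds).map (fun x => x == 'h') := by simp
      simp only [e1, hh_map, nv_map]
      have hhead : ((d0 :: ds).map (fun x => x == 'h')).headI = (d0 == 'h') := by simp
      simp only [hhead]
      have hinit : (if d0 == 'h' then ((6 : Int), 'h') else ((3 : Int), 'v'))
          = ((if d0 == 'h' then (6 : Int) else 3), d0) := by
        rcases hd0 with h | h <;> subst h <;> simp
      rw [hinit]
      have hA := score_closed ds (if d0 == 'h' then (6 : Int) else 3) d0 hd0 hds
      rw [hA]
      exact (mod_bridge _ _ _).symm
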